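-- pv_equiv track=rewrite | github.com/GundalaNikhil/DSA | dsa-problems/Strings/solutions/python/STR-008-k-mismatch-anagram-substrings.py | count_k_mismatch_anagrams
-- ===== SOURCE A (Python) =====
-- def count_k_mismatch_anagrams(s: str, p: str, k: int) -> int:
--     m = len(p)
--     n = len(s)
--
--     if n < m:
--         return 0
--
--     # Build pattern frequency
--     freq_p = [0] * 26
--     for c in p:
--         freq_p[ord(c) - ord('a')] += 1
--
--     # Initialize window frequency
--     freq_window = [0] * 26
--     for i in range(m):
--         freq_window[ord(s[i]) - ord('a')] += 1
--
--     def mismatch_cost(freq_w, freq_p):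
--         cost = 0
--         for i in range(26):
--             if freq_p[i] > freq_w[i]:
--                 cost += freq_p[i] - freq_w[i]
--         return cost
--
--     count = 0
--
--     # Check first window
--     if mismatch_cost(freq_window, freq_p) <= k:
--         count += 1
--
--     # Slide window
--     for i in range(1, n - m + 1):
--         # Remove leftmost char of previous window
--         freq_window[ord(s[i - 1]) - ord('a')] -= 1
--         # Add rightmost char of new window
--         freq_window[ord(s[i + m - 1]) - ord('a')] += 1
--
--         if mismatch_cost(freq_window, freq_p) <= k:
--             count += 1
--
--     return count
-- ===== SOURCE B (Python) =====
-- def count_k_mismatch_anagrams(s: str, p: str, k: int) -> int: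
--     m = len(p)
--     n = len(s)
--     if n < m:
--         return 0
--
--     fp = [0] * 26
--     for c in p:
--         fp[ord(c) - 97] += 1
--
--     # Prefix letter-counts: pre[i] holds the counts of s[:i]; each window's
--     # counts are then a difference of two prefix rows, no sliding state.
--     pre = [[0] * 26]
--     for c in s:
--         row = pre[-1][:]
--         row[ord(c) - 97] += 1
--         pre.append(row)
--
--     total = 0
--     for i in range(n - m + 1):
--         cost = 0
--         for c in range(26):
--             need = fp[c] - (pre[i + m][c] - pre[i][c])
--             if need > 0:
--                 cost += need
--         if cost <= k:
--             total += 1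
--     return total
-- ===== Notes on version B (the rewrite author's own statement) =====
-- stated objective: alternative
-- what changed: B precomputes per-letter prefix-count rows of s and counts windows by comparing the pattern frequency against a difference of two prefix rows, replacing A's mutable sliding frequency window; same O(26*n) cost, no sliding state.
import Mathlib
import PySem

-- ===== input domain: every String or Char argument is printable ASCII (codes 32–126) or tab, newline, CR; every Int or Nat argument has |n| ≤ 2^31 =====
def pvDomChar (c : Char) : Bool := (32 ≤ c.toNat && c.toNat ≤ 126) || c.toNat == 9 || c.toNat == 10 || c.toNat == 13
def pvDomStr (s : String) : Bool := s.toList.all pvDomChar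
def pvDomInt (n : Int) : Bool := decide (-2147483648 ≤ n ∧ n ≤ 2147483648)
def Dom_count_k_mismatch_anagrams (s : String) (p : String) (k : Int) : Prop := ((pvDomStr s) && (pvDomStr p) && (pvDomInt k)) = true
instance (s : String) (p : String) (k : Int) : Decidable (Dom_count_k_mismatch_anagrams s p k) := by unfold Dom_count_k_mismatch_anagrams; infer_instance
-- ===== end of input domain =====

-- B counts windows against per-letter prefix-count rows of s (window counts are a
-- difference of two precomputed rows) instead of A's mutable sliding frequency window.

-- ===== PORT A =====
def pvOrdIdx (c : Char) : Int := (c.toNat : Int) - 97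

def pvBumpA (f : List Int) (c : Char) : List Int :=
  PySem.List.pySetD f (pvOrdIdx c) (PySem.List.pyGetD f (pvOrdIdx c) 0 + 1)

def pvDropA (f : List Int) (c : Char) : List Int :=
  PySem.List.pySetD f (pvOrdIdx c) (PySem.List.pyGetD f (pvOrdIdx c) 0 - 1)

def pvMismatchCost (freq_w freq_p : List Int) : Int :=
  (PySem.List.pyRange 0 26 1).foldl
    (fun cost i =>
      if PySem.List.pyGetD freq_p i 0 > PySem.List.pyGetD freq_w i 0 then
        cost + (PySem.List.pyGetD freq_p i 0 - PySem.List.pyGetD freq_w i 0)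
      else cost) 0

def count_k_mismatch_anagrams (s : String) (p : String) (k : Int) : Int :=
  let m : Int := (p.toList.length : Int)
  let n : Int := (s.toList.length : Int)
  if n < m then 0
  else
    let freq_p := p.toList.foldl (fun f c => pvBumpA f c) (List.replicate 26 0)
    let freq_window := (PySem.List.pyRange 0 m 1).foldl
      (fun f i => pvBumpA f (PySem.List.pyGetD s.toList i 'a')) (List.replicate 26 0)
    let count0 : Int := if pvMismatchCost freq_window freq_p ≤ k then 0 + 1 else 0
    let fin := (PySem.List.pyRange 1 (n - m + 1) 1).foldl
      (fun (st : List Int × Int) i =>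
        let fw := pvBumpA (pvDropA st.1 (PySem.List.pyGetD s.toList (i - 1) 'a'))
                          (PySem.List.pyGetD s.toList (i + m - 1) 'a')
        (fw, if pvMismatchCost fw freq_p ≤ k then st.2 + 1 else st.2))
      (freq_window, count0)
    fin.2

-- ===== PORT B =====
def count_k_mismatch_anagrams_alt (s : String) (p : String) (k : Int) : Int :=
  let m : Int := (p.toList.length : Int)
  let n : Int := (s.toList.length : Int)
  if n < m then 0
  else
    let fp := p.toList.foldl
      (fun f c =>
        PySem.List.pySetD f ((c.toNat : Int) - 97)
          (PySem.List.pyGetD f ((c.toNat : Int) - 97) 0 + 1))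
      (List.replicate 26 0)
    -- pre[i] holds the 26 letter counts of s[:i]; each step copies the last row and bumps one slot
    let pre := s.toList.foldl
      (fun acc c =>
        acc ++ [PySem.List.pySetD (PySem.List.pyGetD acc (-1) []) ((c.toNat : Int) - 97)
                  (PySem.List.pyGetD (PySem.List.pyGetD acc (-1) []) ((c.toNat : Int) - 97) 0 + 1)])
      [List.replicate 26 0]
    (PySem.List.pyRange 0 (n - m + 1) 1).foldl
      (fun total i =>
        let cost := (PySem.List.pyRange 0 26 1).foldl
          (fun cost c =>
            let need : Int := PySem.List.pyGetD fp c 0 -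
              (PySem.List.pyGetD (PySem.List.pyGetD pre (i + m) []) c 0 -
               PySem.List.pyGetD (PySem.List.pyGetD pre i []) c 0)
            if need > 0 then cost + need else cost) 0
        if cost ≤ k then total + 1 else total) 0

-- ===== PRECONDITION & SPEC =====
-- Pre_ excludes exactly the inputs where A raises IndexError: when the window
-- loops run (len(s) ≥ len(p)), every character of s and p must map through
-- ord(c)-ord('a') to a valid Python index of a 26-element list, i.e. ord(c) ∈ [71,122].
def Pre_count_k_mismatch_anagrams (s : String) (p : String) (_k : Int) : Prop :=
  ((s.toList.length : Int) < (p.toList.length : Int)) ∨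
  ((s.toList ++ p.toList).all (fun c => decide (71 ≤ c.toNat ∧ c.toNat ≤ 122)) = true)
instance (s : String) (p : String) (k : Int) : Decidable (Pre_count_k_mismatch_anagrams s p k) := by
  unfold Pre_count_k_mismatch_anagrams; infer_instance

def pvWitness_count_k_mismatch_anagrams : String × String × Int := ("abab", "ab", 1)

def Spec_count_k_mismatch_anagrams (s : String) (p : String) (k : Int) (out : Int) : Prop := out = count_k_mismatch_anagrams_alt s p k
instance (s : String) (p : String) (k : Int) (out : Int) : Decidable (Spec_count_k_mismatch_anagrams s p k out) := by unfold Spec_count_k_mismatch_anagrams; infer_instance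

-- ===== CLAIM (what is proved, stated in full; the proofs are below) =====
def Claim_equal_count_k_mismatch_anagrams : Prop := ∀ (s : String) (p : String) (k : Int), Dom_count_k_mismatch_anagrams s p k → Pre_count_k_mismatch_anagrams s p k → Spec_count_k_mismatch_anagrams s p k (count_k_mismatch_anagrams s p k)

-- ===== LEMMAS AND PROOFS =====

-- a char whose Python 26-bucket index access does not raise
def pvGood (c : Char) : Prop := 71 ≤ c.toNat ∧ c.toNat ≤ 122

-- the effective (wrapped) bucket of an in-range Int index into a length-26 list
def pvE (i : Int) : Nat := if 0 ≤ i then i.toNat else 26 - (-i).toNat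

-- bucket of a character
def pvB (c : Char) : Nat := pvE (pvOrdIdx c)

lemma pvIdx26 (i : Int) (h1 : -26 ≤ i) (h2 : i < 26) :
    PySem.List.pyIdx? 26 i = some (pvE i) ∧ pvE i < 26 := by
  unfold PySem.List.pyIdx? pvE
  split_ifs with h0 <;> simp_all

lemma pvGetD26 (f : List Int) (hf : f.length = 26) (i : Int) (d : Int)
    (h1 : -26 ≤ i) (h2 : i < 26) :
    PySem.List.pyGetD f i d = f.getD (pvE i) d := by
  obtain ⟨hs, hlt⟩ := pvIdx26 i h1 h2
  unfold PySem.List.pyGetD PySem.List.pyGet?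
  rw [hf, hs]
  simp [List.getD_eq_getElem?_getD]

lemma pvSetD26 (f : List Int) (hf : f.length = 26) (i : Int) (v : Int)
    (h1 : -26 ≤ i) (h2 : i < 26) :
    PySem.List.pySetD f i v = f.set (pvE i) v := by
  obtain ⟨hs, _⟩ := pvIdx26 i h1 h2
  unfold PySem.List.pySetD PySem.List.pySet?
  rw [hf, hs]
  rfl

lemma pvGood_idx {c : Char} (h : pvGood c) : -26 ≤ pvOrdIdx c ∧ pvOrdIdx c < 26 := by
  obtain ⟨h1, h2⟩ := h
  unfold pvOrdIdx
  omega

lemma pvB_lt {c : Char} (h : pvGood c) : pvB c < 26 := by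
  obtain ⟨h1, h2⟩ := pvGood_idx h
  exact (pvIdx26 _ h1 h2).2

lemma pvGetD_set_self (f : List Int) (e : Nat) (he : e < f.length) (v d : Int) :
    (f.set e v).getD e d = v := by
  simp [List.getD_eq_getElem?_getD, he]

lemma pvGetD_set_ne (f : List Int) (e i : Nat) (hne : i ≠ e) (v d : Int) :
    (f.set e v).getD i d = f.getD i d := by
  have : ¬ e = i := fun h => hne h.symm
  simp [List.getD_eq_getElem?_getD, this]

lemma pvBumpA_eq (f : List Int) (hf : f.length = 26) {c : Char} (hc : pvGood c) :
    pvBumpA f c = f.set (pvB c) (f.getD (pvB c) 0 + 1) := by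
  obtain ⟨h1, h2⟩ := pvGood_idx hc
  unfold pvBumpA pvB
  rw [pvGetD26 f hf _ _ h1 h2, pvSetD26 f hf _ _ h1 h2]

lemma pvDropA_eq (f : List Int) (hf : f.length = 26) {c : Char} (hc : pvGood c) :
    pvDropA f c = f.set (pvB c) (f.getD (pvB c) 0 - 1) := by
  obtain ⟨h1, h2⟩ := pvGood_idx hc
  unfold pvDropA pvB
  rw [pvGetD26 f hf _ _ h1 h2, pvSetD26 f hf _ _ h1 h2]

-- count of characters of l landing in bucket e
def pvCnt (l : List Char) (e : Nat) : Int := (l.countP (fun c => pvB c == e) : Int)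

-- prefix counts: bucket counts of the first i characters of t
def pvQ (t : List Char) (i : Nat) (e : Nat) : Int := pvCnt (t.take i) e

-- bucket counts of the window of length mN starting at j
def pvW (t : List Char) (mN : Nat) (j : Nat) (e : Nat) : Int := pvQ t (j + mN) e - pvQ t j e

-- mismatch cost of a window described by its bucket-count function w
def pvCostW (fp : List Int) (w : Nat → Int) : Int :=
  ((List.range 26).map (fun e => if fp.getD e 0 > w e then fp.getD e 0 - w e else 0)).sum

-- A's mismatch_cost equals the clean cost of the window the freq list describes
lemma pvMismatchCost_eq (fw fp : List Int) (w : Nat → Int)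
    (hw : ∀ e, e < 26 → fw.getD e 0 = w e) :
    pvMismatchCost fw fp = pvCostW fp w := by
  unfold pvMismatchCost pvCostW
  rw [PySem.List.pyRange_one, List.foldl_map]
  have hcast : ((26 : Int) - 0).toNat = 26 := by decide
  rw [hcast]
  have hbody : (List.range 26).foldl
      (fun (cost : Int) (e : Nat) =>
        if PySem.List.pyGetD fp ((0 : Int) + e) 0 > PySem.List.pyGetD fw ((0 : Int) + e) 0 then
          cost + (PySem.List.pyGetD fp ((0 : Int) + e) 0 - PySem.List.pyGetD fw ((0 : Int) + e) 0)
        else cost) 0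
      = (List.range 26).foldl
      (fun (cost : Int) (e : Nat) =>
        cost + (if fp.getD e 0 > w e then fp.getD e 0 - w e else 0)) 0 := by
    apply PySem.List.foldl_congr_mem
    intro acc e he
    simp only [List.mem_range] at he
    simp only [zero_add, PySem.List.pyGetD_natCast, hw e he]
    split_ifs <;> ring
  rw [hbody, PySem.List.foldl_add]
  simp

-- the zero row reads 0 in every bucket
lemma pvZeroRow (e : Nat) : (List.replicate 26 (0 : Int)).getD e 0 = 0 := by
  rw [List.getD_eq_getElem?_getD, List.getElem?_replicate]
  split_ifs <;> simp

-- a foldl of bumps over good characters computes bucket counts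
lemma pvCntFold (l : List Char) : ∀ (f : List Int), f.length = 26 → (∀ c ∈ l, pvGood c) →
    (l.foldl (fun f c => pvBumpA f c) f).length = 26 ∧
    (∀ e, e < 26 → (l.foldl (fun f c => pvBumpA f c) f).getD e 0 = f.getD e 0 + pvCnt l e) := by
  induction l with
  | nil => intro f hf _; refine ⟨hf, ?_⟩; intro e _; simp [pvCnt]
  | cons c l ih =>
    intro f hf hgood
    have hc : pvGood c := hgood c (by simp)
    have he : pvB c < 26 := pvB_lt hc
    simp only [List.foldl_cons]
    rw [pvBumpA_eq f hf hc]
    have hf' : (f.set (pvB c) (f.getD (pvB c) 0 + 1)).length = 26 := by simp [hf]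
    obtain ⟨r1, r2⟩ := ih _ hf' (fun c' hc' => hgood c' (by simp [hc']))
    refine ⟨r1, ?_⟩
    intro e helt
    rw [r2 e helt]
    have hcnt : pvCnt (c :: l) e = pvCnt l e + (if pvB c = e then 1 else 0) := by
      unfold pvCnt
      rw [List.countP_cons]
      by_cases h : pvB c = e <;> simp [h]
    rw [hcnt]
    by_cases h : e = pvB c
    · subst h
      rw [pvGetD_set_self f _ (by omega) _ 0]
      simp
      ring
    · rw [pvGetD_set_ne f _ e h]
      have : ¬ pvB c = e := fun hh => h hh.symm
      simp [this]

-- prefix-count step: reading one more character adds its bucket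
lemma pvQ_succ (t : List Char) (j : Nat) (hj : j < t.length) (e : Nat) :
    pvQ t (j + 1) e = pvQ t j e + (if pvB (t.getD j 'a') = e then 1 else 0) := by
  unfold pvQ pvCnt
  rw [List.take_add_one, List.countP_append]
  rw [List.getD_eq_getElem?_getD, List.getElem?_eq_getElem hj]
  simp only [Option.getD_some, Option.toList_some]
  by_cases h : pvB t[j] = e <;> simp [h]

-- window-count step
lemma pvW_succ (t : List Char) (mN : Nat) (j : Nat) (hj : j + mN < t.length) (e : Nat) :
    pvW t mN (j + 1) e
      = pvW t mN j e - (if pvB (t.getD j 'a') = e then 1 else 0)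
        + (if pvB (t.getD (j + mN) 'a') = e then 1 else 0) := by
  unfold pvW
  have h1 : j + 1 + mN = (j + mN) + 1 := by omega
  rw [h1, pvQ_succ t (j + mN) hj e, pvQ_succ t j (by omega) e]
  ring

-- getD after drop-then-bump, as a delta on the old row
lemma pvDropBump_getD (f : List Int) (hf : f.length = 26) (e1 e2 e : Nat)
    (h1 : e1 < 26) (h2 : e2 < 26) (he : e < 26) :
    ((f.set e1 (f.getD e1 0 - 1)).set e2 ((f.set e1 (f.getD e1 0 - 1)).getD e2 0 + 1)).getD e 0
      = f.getD e 0 - (if e1 = e then 1 else 0) + (if e2 = e then 1 else 0) := by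
  have hg : (f.set e1 (f.getD e1 0 - 1)).length = 26 := by simp [hf]
  have hgd : ∀ x, x < 26 → (f.set e1 (f.getD e1 0 - 1)).getD x 0
      = f.getD x 0 - (if e1 = x then 1 else 0) := by
    intro x _
    by_cases h : x = e1
    · subst h; rw [pvGetD_set_self f _ (by omega) _ 0]; simp
    · rw [pvGetD_set_ne f _ x h]
      have : ¬ e1 = x := fun hh => h hh.symm
      simp [this]
  by_cases h : e = e2
  · subst h
    rw [pvGetD_set_self _ _ (by omega) _ 0, hgd e he]
    simp
  · rw [pvGetD_set_ne _ _ e h, hgd e he]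
    have : ¬ e2 = e := fun hh => h hh.symm
    simp [this]

-- t.getD under a pyGetD with a Nat-cast index
lemma pvGetChar (t : List Char) (j : Nat) :
    PySem.List.pyGetD t (j : Int) 'a' = t.getD j 'a' := by
  simp

-- A's sliding loop, rebased over List.range: state stays the window counts, the
-- counter advances exactly as the window-cost tally
lemma pvSlideA (t : List Char) (fp : List Int) (mN : Nat) (k : Int)
    (hgood : ∀ c ∈ t, pvGood c) (hmn : mN ≤ t.length) :
    ∀ (d : Nat), d ≤ t.length - mN → ∀ (fw : List Int) (c : Int),
    fw.length = 26 → (∀ e, e < 26 → fw.getD e 0 = pvW t mN 0 e) →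
    (((List.range d).map (fun (j : Nat) => (1 : Int) + (j : Int))).foldl
        (fun (st : List Int × Int) i =>
          let f := pvBumpA (pvDropA st.1 (PySem.List.pyGetD t (i - 1) 'a'))
                           (PySem.List.pyGetD t (i + (mN : Int) - 1) 'a')
          (f, if pvMismatchCost f fp ≤ k then st.2 + 1 else st.2)) (fw, c)).2
      = (List.range d).foldl
          (fun tot j => if pvCostW fp (pvW t mN (j + 1)) ≤ k then tot + 1 else tot) c ∧
    (((List.range d).map (fun (j : Nat) => (1 : Int) + (j : Int))).foldl
        (fun (st : List Int × Int) i =>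
          let f := pvBumpA (pvDropA st.1 (PySem.List.pyGetD t (i - 1) 'a'))
                           (PySem.List.pyGetD t (i + (mN : Int) - 1) 'a')
          (f, if pvMismatchCost f fp ≤ k then st.2 + 1 else st.2)) (fw, c)).1.length = 26 ∧
    (∀ e, e < 26 →
      (((List.range d).map (fun (j : Nat) => (1 : Int) + (j : Int))).foldl
        (fun (st : List Int × Int) i =>
          let f := pvBumpA (pvDropA st.1 (PySem.List.pyGetD t (i - 1) 'a'))
                           (PySem.List.pyGetD t (i + (mN : Int) - 1) 'a')
          (f, if pvMismatchCost f fp ≤ k then st.2 + 1 else st.2)) (fw, c)).1.getD e 0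
      = pvW t mN d e) := by
  intro d
  induction d with
  | zero =>
    intro _ fw c hf hw
    simp only [List.range_zero, List.map_nil, List.foldl_nil]
    exact ⟨trivial, hf, hw⟩
  | succ d ih =>
    intro hd fw c hf hw
    obtain ⟨ihc, ihlen, ihw⟩ := ih (by omega) fw c hf hw
    rw [List.range_succ, List.map_append, List.foldl_append, List.foldl_append,
      List.map_cons, List.map_nil, List.foldl_cons, List.foldl_nil, List.foldl_cons,
      List.foldl_nil]
    set st := ((List.range d).map (fun (j : Nat) => (1 : Int) + (j : Int))).foldl
        (fun (st : List Int × Int) i =>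
          let f := pvBumpA (pvDropA st.1 (PySem.List.pyGetD t (i - 1) 'a'))
                           (PySem.List.pyGetD t (i + (mN : Int) - 1) 'a')
          (f, if pvMismatchCost f fp ≤ k then st.2 + 1 else st.2)) (fw, c) with hst
    have hdlen : d < t.length := by omega
    have hdm : d + mN < t.length := by omega
    have harith1 : (1 : Int) + (d : Int) - 1 = ((d : Nat) : Int) := by ring
    have harith2 : (1 : Int) + (d : Int) + (mN : Int) - 1 = ((d + mN : Nat) : Int) := by
      push_cast; ring
    simp only [harith1, harith2, pvGetChar]
    have hm1 : t.getD d 'a' ∈ t := by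
      rw [List.getD_eq_getElem t 'a' hdlen]; exact List.getElem_mem hdlen
    have hm2 : t.getD (d + mN) 'a' ∈ t := by
      rw [List.getD_eq_getElem t 'a' hdm]; exact List.getElem_mem hdm
    have hc1 : pvGood (t.getD d 'a') := hgood _ hm1
    have hc2 : pvGood (t.getD (d + mN) 'a') := hgood _ hm2
    rw [pvDropA_eq st.1 ihlen hc1,
      pvBumpA_eq (st.1.set (pvB (t.getD d 'a')) (st.1.getD (pvB (t.getD d 'a')) 0 - 1))
        (by simp [ihlen]) hc2]
    have hwnew : ∀ e, e < 26 →
        ((st.1.set (pvB (t.getD d 'a')) (st.1.getD (pvB (t.getD d 'a')) 0 - 1)).set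
          (pvB (t.getD (d + mN) 'a'))
          ((st.1.set (pvB (t.getD d 'a')) (st.1.getD (pvB (t.getD d 'a')) 0 - 1)).getD
            (pvB (t.getD (d + mN) 'a')) 0 + 1)).getD e 0 = pvW t mN (d + 1) e := by
      intro e he
      rw [pvDropBump_getD st.1 ihlen _ _ e (pvB_lt hc1) (pvB_lt hc2) he, ihw e he,
        pvW_succ t mN d hdm e]
    refine ⟨?_, by simp [ihlen], hwnew⟩
    rw [pvMismatchCost_eq _ fp _ hwnew, ihc]

-- B's pre list is the table of prefix rows
lemma pvPreBuild (v : List Char) : ∀ (u : List Char), (∀ c ∈ v, pvGood c) →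
    (v.foldl
      (fun acc c => acc ++ [pvBumpA (PySem.List.pyGetD acc (-1) []) c])
      ((List.range (u.length + 1)).map
        (fun i => (u.take i).foldl (fun f c => pvBumpA f c) (List.replicate 26 0))))
    = (List.range (u.length + v.length + 1)).map
        (fun i => ((u ++ v).take i).foldl (fun f c => pvBumpA f c) (List.replicate 26 0)) := by
  induction v with
  | nil => intro u _; simp
  | cons c v ih =>
    intro u hgood
    rw [List.foldl_cons]
    have hlast : PySem.List.pyGetD
        ((List.range (u.length + 1)).map
          (fun i => (u.take i).foldl (fun f c => pvBumpA f c) (List.replicate 26 0))) (-1) []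
        = u.foldl (fun f c => pvBumpA f c) (List.replicate 26 0) := by
      rw [List.range_succ, List.map_append, List.map_cons, List.map_nil,
        PySem.List.pyGetD_neg_one_append_singleton, List.take_length]
    rw [hlast]
    have hstep : (List.range (u.length + 1)).map
          (fun i => (u.take i).foldl (fun f c => pvBumpA f c) (List.replicate 26 0))
          ++ [pvBumpA (u.foldl (fun f c => pvBumpA f c) (List.replicate 26 0)) c]
        = (List.range ((u ++ [c]).length + 1)).map
          (fun i => ((u ++ [c]).take i).foldl (fun f c => pvBumpA f c) (List.replicate 26 0)) := by
      have hlen : (u ++ [c]).length = u.length + 1 := by simp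
      have h1 : (List.range (u.length + 1 + 1)).map
            (fun i => ((u ++ [c]).take i).foldl (fun f c => pvBumpA f c) (List.replicate 26 0))
          = (List.range (u.length + 1)).map
            (fun i => ((u ++ [c]).take i).foldl (fun f c => pvBumpA f c) (List.replicate 26 0))
            ++ [((u ++ [c]).take (u.length + 1)).foldl (fun f c => pvBumpA f c)
                  (List.replicate 26 0)] := by
        rw [List.range_succ, List.map_append, List.map_cons, List.map_nil]
      rw [hlen, h1]
      congr 1
      · apply List.map_congr_left
        intro i hi
        simp only [List.mem_range] at hi
        rw [List.take_append_of_le_length (by omega)]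
      · rw [List.take_of_length_le (by simp), List.foldl_append, List.foldl_cons,
          List.foldl_nil]
    rw [hstep, ih (u ++ [c]) (fun c' hc' => hgood c' (by simp [hc']))]
    have hidx : (u ++ [c]).length + v.length + 1 = u.length + (c :: v).length + 1 := by
      simp
      omega
    rw [hidx, List.append_assoc, List.singleton_append]

-- A's index-driven first-window loop is the fold of bumps over the prefix it reads
lemma pvTakeFold (t : List Char) (i : Nat) (hi : i ≤ t.length) (g : List Int) :
    (List.range i).foldl (fun f j => pvBumpA f (t.getD j 'a')) g
      = (t.take i).foldl (fun f c => pvBumpA f c) g := by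
  induction i with
  | zero => simp
  | succ i ih =>
    rw [List.range_succ, List.foldl_append, List.foldl_cons, List.foldl_nil,
      ih (by omega), List.take_add_one, List.getElem?_eq_getElem (by omega : i < t.length),
      Option.toList_some, List.foldl_append, List.foldl_cons, List.foldl_nil,
      List.getD_eq_getElem t 'a' (by omega : i < t.length)]

-- B's inner 26-slot loop computes the window's mismatch cost from two prefix rows
lemma pvCostLoopB (fp ra rb : List Int) (w : Nat → Int)
    (hw : ∀ e, e < 26 → ra.getD e 0 - rb.getD e 0 = w e) :
    (PySem.List.pyRange 0 26 1).foldl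
      (fun (cost : Int) c =>
        let need : Int := PySem.List.pyGetD fp c 0 -
          (PySem.List.pyGetD ra c 0 - PySem.List.pyGetD rb c 0)
        if need > 0 then cost + need else cost) 0 = pvCostW fp w := by
  unfold pvCostW
  rw [PySem.List.pyRange_one, List.foldl_map]
  have hcast : ((26 : Int) - 0).toNat = 26 := by decide
  rw [hcast]
  have hbody : (List.range 26).foldl
      (fun (cost : Int) (e : Nat) =>
        let need : Int := PySem.List.pyGetD fp ((0 : Int) + e) 0 -
          (PySem.List.pyGetD ra ((0 : Int) + e) 0 - PySem.List.pyGetD rb ((0 : Int) + e) 0)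
        if need > 0 then cost + need else cost) 0
      = (List.range 26).foldl
      (fun (cost : Int) (e : Nat) =>
        cost + (if fp.getD e 0 > w e then fp.getD e 0 - w e else 0)) 0 := by
    apply PySem.List.foldl_congr_mem
    intro acc e he
    simp only [List.mem_range] at he
    simp only [zero_add, PySem.List.pyGetD_natCast, hw e he]
    split_ifs <;> omega
  rw [hbody, PySem.List.foldl_add]
  simp

-- ===== VERDICT (by name: the statement is the Claim_ definition above) =====
theorem count_k_mismatch_anagrams_spec : Claim_equal_count_k_mismatch_anagrams := by
  unfold Claim_equal_count_k_mismatch_anagrams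
  intro s p k _ hpre
  unfold Spec_count_k_mismatch_anagrams
  unfold count_k_mismatch_anagrams count_k_mismatch_anagrams_alt
  by_cases h : ((s.toList.length : Int) < (p.toList.length : Int))
  · simp only [if_pos h]
  · simp only [if_neg h]
    have hnm : p.toList.length ≤ s.toList.length := by omega
    have hall : ∀ c ∈ s.toList ++ p.toList, pvGood c := by
      rcases hpre with h' | h'
      · exact absurd h' h
      · intro c hc
        have := List.all_eq_true.mp h' c hc
        simpa [pvGood] using this
    have hgt : ∀ c ∈ s.toList, pvGood c := fun c hc => hall c (by simp [hc])
    -- both frequency tables are the same fold of bumps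
    have hfpB : (fun (f : List Int) (c : Char) =>
          PySem.List.pySetD f ((c.toNat : Int) - 97)
            (PySem.List.pyGetD f ((c.toNat : Int) - 97) 0 + 1))
        = (fun (f : List Int) (c : Char) => pvBumpA f c) := rfl
    have hpreB : (fun (acc : List (List Int)) (c : Char) =>
          acc ++ [PySem.List.pySetD (PySem.List.pyGetD acc (-1) []) ((c.toNat : Int) - 97)
            (PySem.List.pyGetD (PySem.List.pyGetD acc (-1) []) ((c.toNat : Int) - 97) 0 + 1)])
        = (fun (acc : List (List Int)) (c : Char) =>
            acc ++ [pvBumpA (PySem.List.pyGetD acc (-1) []) c]) := rfl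
    have hpre0 : [List.replicate 26 (0 : Int)]
        = (List.range (([] : List Char).length + 1)).map
            (fun i => (([] : List Char).take i).foldl (fun f c => pvBumpA f c)
              (List.replicate 26 0)) := rfl
    rw [hfpB, hpreB, hpre0, pvPreBuild s.toList [] hgt]
    simp only [List.nil_append, List.length_nil, Nat.zero_add]
    -- rows of pre read off the prefix counts
    have hrow : ∀ (i : Nat), ∀ e, e < 26 →
        ((s.toList.take i).foldl (fun f c => pvBumpA f c) (List.replicate 26 0)).getD e 0
          = pvQ s.toList i e := by
      intro i e he
      obtain ⟨_, h2⟩ := pvCntFold (s.toList.take i) (List.replicate 26 0) (by simp)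
        (fun c hc => hgt c (List.mem_of_mem_take hc))
      rw [h2 e he, pvZeroRow]
      simp [pvQ]
    -- A's first window is the fold of bumps over the first mN characters
    rw [PySem.List.pyRange_one 0 ((p.toList.length : Int)),
      show (((p.toList.length : Int)) - 0).toNat = p.toList.length from by omega,
      List.foldl_map]
    have hwin : (List.range p.toList.length).foldl
        (fun f (j : Nat) => pvBumpA f (PySem.List.pyGetD s.toList ((0 : Int) + (j : Int)) 'a'))
        (List.replicate 26 0)
        = (s.toList.take p.toList.length).foldl (fun f c => pvBumpA f c)
            (List.replicate 26 0) := by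
      have h1 : (List.range p.toList.length).foldl
          (fun f (j : Nat) => pvBumpA f (PySem.List.pyGetD s.toList ((0 : Int) + (j : Int)) 'a'))
          (List.replicate 26 0)
          = (List.range p.toList.length).foldl
            (fun f (j : Nat) => pvBumpA f (s.toList.getD j 'a')) (List.replicate 26 0) :=
        by apply PySem.List.foldl_congr_mem; intro acc j _; simp
      rw [h1]
      exact pvTakeFold s.toList p.toList.length hnm _
    rw [hwin]
    have hfw0len : ((s.toList.take p.toList.length).foldl (fun f c => pvBumpA f c)
        (List.replicate 26 0)).length = 26 :=
      (pvCntFold (s.toList.take p.toList.length) (List.replicate 26 0) (by simp)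
        (fun c hc => hgt c (List.mem_of_mem_take hc))).1
    have hfw0w : ∀ e, e < 26 →
        ((s.toList.take p.toList.length).foldl (fun f c => pvBumpA f c)
          (List.replicate 26 0)).getD e 0 = pvW s.toList p.toList.length 0 e := by
      intro e he
      rw [hrow _ e he]
      simp [pvW, pvQ, pvCnt]
    rw [pvMismatchCost_eq _ _ (pvW s.toList p.toList.length 0) hfw0w]
    -- A's sliding loop
    rw [PySem.List.pyRange_one 1 ((s.toList.length : Int) - (p.toList.length : Int) + 1),
      show (((s.toList.length : Int) - (p.toList.length : Int) + 1) - 1).toNat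
        = s.toList.length - p.toList.length from by omega]
    rw [(pvSlideA s.toList
        (p.toList.foldl (fun f c => pvBumpA f c) (List.replicate 26 0))
        p.toList.length k hgt hnm (s.toList.length - p.toList.length) (by omega)
        _ _ hfw0len hfw0w).1]
    -- B's counting loop
    rw [PySem.List.pyRange_one 0 ((s.toList.length : Int) - (p.toList.length : Int) + 1),
      show (((s.toList.length : Int) - (p.toList.length : Int) + 1) - 0).toNat
        = s.toList.length - p.toList.length + 1 from by omega,
      List.foldl_map]
    have hB : (List.range (s.toList.length - p.toList.length + 1)).foldl
        (fun (total : Int) (j : Nat) =>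
          let cost := (PySem.List.pyRange 0 26 1).foldl
            (fun (cost : Int) c =>
              let need : Int := PySem.List.pyGetD
                  (p.toList.foldl (fun f c => pvBumpA f c) (List.replicate 26 0)) c 0 -
                (PySem.List.pyGetD (PySem.List.pyGetD
                    ((List.range (s.toList.length + 1)).map
                      (fun i => (s.toList.take i).foldl (fun f c => pvBumpA f c)
                        (List.replicate 26 0)))
                    ((0 : Int) + (j : Int) + (p.toList.length : Int)) []) c 0 -
                 PySem.List.pyGetD (PySem.List.pyGetD
                    ((List.range (s.toList.length + 1)).map
                      (fun i => (s.toList.take i).foldl (fun f c => pvBumpA f c)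
                        (List.replicate 26 0)))
                    ((0 : Int) + (j : Int)) []) c 0)
              if need > 0 then cost + need else cost) 0
          if cost ≤ k then total + 1 else total) 0
        = (List.range (s.toList.length - p.toList.length + 1)).foldl
            (fun (tot : Int) (j : Nat) =>
              if pvCostW (p.toList.foldl (fun f c => pvBumpA f c) (List.replicate 26 0))
                  (pvW s.toList p.toList.length j) ≤ k
              then tot + 1 else tot) 0 := by
      apply PySem.List.foldl_congr_mem
      intro acc j hj
      simp only [List.mem_range] at hj
      have hi1 : (0 : Int) + (j : Int) + (p.toList.length : Int)
          = ((j + p.toList.length : Nat) : Int) := by push_cast; ring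
      have hi2 : (0 : Int) + (j : Int) = ((j : Nat) : Int) := by ring
      rw [hi1, hi2, PySem.List.pyGetD_natCast, PySem.List.pyGetD_natCast,
        PySem.List.getD_map_range _ _ _ _ (by omega),
        PySem.List.getD_map_range _ _ _ _ (by omega)]
      rw [pvCostLoopB _ _ _ (pvW s.toList p.toList.length j)
        (by
          intro e he
          rw [hrow _ e he, hrow _ e he]
          rfl)]
    rw [hB]
    -- peel B's window 0 off; the remaining tallies coincide index for index
    rw [List.range_succ_eq_map, List.foldl_cons, List.foldl_map]
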